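-- pv_equiv track=rewrite | github.com/guhask/trustclaim-ai | agents/prediction_agent.py | _build_risk_list
-- ===== SOURCE A (Python) =====
-- def _build_risk_list(compliance_report: dict, llm_result: dict) -> list:
--     risks = []
--
--     severity_order = {"CRITICAL": 0, "HIGH": 1, "MEDIUM": 2, "LOW": 3}
--
--     for v in compliance_report.get("violations", []):
--         risks.append({
--             "title":    v.get("title", "Compliance Violation"),
--             "severity": v.get("severity", "HIGH"),
--             "description": v.get("description", ""),
--             "irdai_ref":   v.get("irdai_ref", ""),
--             "fix":      v.get("fix", ""),
--             "type":     "VIOLATION"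
--         })
--
--     for w in compliance_report.get("warnings", []):
--         risks.append({
--             "title":    w.get("title", "Warning"),
--             "severity": w.get("severity", "MEDIUM"),
--             "description": w.get("description", ""),
--             "irdai_ref":   w.get("irdai_ref", ""),
--             "fix":      w.get("fix", ""),
--             "type":     "WARNING"
--         })
--
--     for r in llm_result.get("additional_risks", []):
--         risks.append({
--             "title":    r.get("risk", "Additional Risk"),
--             "severity": r.get("severity", "MEDIUM"),
--             "description": r.get("risk", ""),
--             "irdai_ref":   "AI Analysis",
--             "fix":      r.get("fix", ""),
--             "type":     "AI_INSIGHT"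
--         })
--
--     # Sort by severity
--     risks.sort(key=lambda x: severity_order.get(x["severity"], 4))
--     return risks
-- ===== SOURCE B (Python) =====
-- def _build_risk_list(compliance_report: dict, llm_result: dict) -> list:
--     # Bucket (counting) sort by severity rank: no comparison sort at the end.
--     severity_order = {"CRITICAL": 0, "HIGH": 1, "MEDIUM": 2, "LOW": 3}
--     buckets = [[], [], [], [], []]
--
--     for v in compliance_report.get("violations", []):
--         row = {
--             "title":    v.get("title", "Compliance Violation"),
--             "severity": v.get("severity", "HIGH"),
--             "description": v.get("description", ""),
--             "irdai_ref":   v.get("irdai_ref", ""),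
--             "fix":      v.get("fix", ""),
--             "type":     "VIOLATION"
--         }
--         buckets[severity_order.get(row["severity"], 4)].append(row)
--
--     for w in compliance_report.get("warnings", []):
--         row = {
--             "title":    w.get("title", "Warning"),
--             "severity": w.get("severity", "MEDIUM"),
--             "description": w.get("description", ""),
--             "irdai_ref":   w.get("irdai_ref", ""),
--             "fix":      w.get("fix", ""),
--             "type":     "WARNING"
--         }
--         buckets[severity_order.get(row["severity"], 4)].append(row)
--
--     for r in llm_result.get("additional_risks", []):
--         row = {
--             "title":    r.get("risk", "Additional Risk"),
--             "severity": r.get("severity", "MEDIUM"),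
--             "description": r.get("risk", ""),
--             "irdai_ref":   "AI Analysis",
--             "fix":      r.get("fix", ""),
--             "type":     "AI_INSIGHT"
--         }
--         buckets[severity_order.get(row["severity"], 4)].append(row)
--
--     return [row for bucket in buckets for row in bucket]
-- ===== Notes on version B (the rewrite author's own statement) =====
-- stated objective: alternative
-- what changed: Replaces the final comparison sort with a 5-way bucket (counting) sort: each row is appended to the bucket of its severity rank as it is built, and the buckets are concatenated, reproducing the stable sort order without sorting.
import Mathlib
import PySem

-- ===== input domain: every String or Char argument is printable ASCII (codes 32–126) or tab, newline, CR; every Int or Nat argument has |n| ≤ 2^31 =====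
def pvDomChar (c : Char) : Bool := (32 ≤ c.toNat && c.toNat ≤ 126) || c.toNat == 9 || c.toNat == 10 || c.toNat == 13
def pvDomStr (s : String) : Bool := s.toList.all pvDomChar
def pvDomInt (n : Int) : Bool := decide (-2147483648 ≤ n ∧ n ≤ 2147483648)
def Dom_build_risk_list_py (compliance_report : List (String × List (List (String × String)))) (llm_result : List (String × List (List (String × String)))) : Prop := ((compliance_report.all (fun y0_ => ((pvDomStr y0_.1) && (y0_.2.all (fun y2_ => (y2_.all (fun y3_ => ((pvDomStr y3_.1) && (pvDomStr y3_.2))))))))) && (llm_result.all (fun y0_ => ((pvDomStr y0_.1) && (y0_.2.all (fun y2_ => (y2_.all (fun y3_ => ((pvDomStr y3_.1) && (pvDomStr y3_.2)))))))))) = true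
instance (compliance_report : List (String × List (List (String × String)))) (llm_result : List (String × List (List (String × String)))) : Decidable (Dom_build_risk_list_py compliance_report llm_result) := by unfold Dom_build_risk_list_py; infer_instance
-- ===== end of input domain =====

-- ===== PORT A =====
-- B changes only the final ordering step: a 5-way bucket concatenation instead of list.sort (alternative algorithm, same output).
-- Shared row builders (both Pythons build the identical row dicts): each row is a 6-key dict with distinct literal keys,
-- represented as the association list in insertion order.
def pvRowV (v : List (String × String)) : List (String × String) :=
  [("title", PySem.Dict.getD (PySem.Dict.mk v) "title" "Compliance Violation"),
   ("severity", PySem.Dict.getD (PySem.Dict.mk v) "severity" "HIGH"),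
   ("description", PySem.Dict.getD (PySem.Dict.mk v) "description" ""),
   ("irdai_ref", PySem.Dict.getD (PySem.Dict.mk v) "irdai_ref" ""),
   ("fix", PySem.Dict.getD (PySem.Dict.mk v) "fix" ""),
   ("type", "VIOLATION")]

def pvRowW (w : List (String × String)) : List (String × String) :=
  [("title", PySem.Dict.getD (PySem.Dict.mk w) "title" "Warning"),
   ("severity", PySem.Dict.getD (PySem.Dict.mk w) "severity" "MEDIUM"),
   ("description", PySem.Dict.getD (PySem.Dict.mk w) "description" ""),
   ("irdai_ref", PySem.Dict.getD (PySem.Dict.mk w) "irdai_ref" ""),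
   ("fix", PySem.Dict.getD (PySem.Dict.mk w) "fix" ""),
   ("type", "WARNING")]

def pvRowR (r : List (String × String)) : List (String × String) :=
  [("title", PySem.Dict.getD (PySem.Dict.mk r) "risk" "Additional Risk"),
   ("severity", PySem.Dict.getD (PySem.Dict.mk r) "severity" "MEDIUM"),
   ("description", PySem.Dict.getD (PySem.Dict.mk r) "risk" ""),
   ("irdai_ref", "AI Analysis"),
   ("fix", PySem.Dict.getD (PySem.Dict.mk r) "fix" ""),
   ("type", "AI_INSIGHT")]

-- severity_order.get(x["severity"], 4); x["severity"] always exists in the rows both programs build,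
-- so the inner getD's "" default is a pure totality guard (never reached).
def pvKey (x : List (String × String)) : Int :=
  PySem.Dict.getD (PySem.Dict.mk [("CRITICAL", (0:Int)), ("HIGH", 1), ("MEDIUM", 2), ("LOW", 3)])
    (PySem.Dict.getD (PySem.Dict.mk x) "severity" "") 4

def build_risk_list_py (compliance_report : List (String × List (List (String × String)))) (llm_result : List (String × List (List (String × String)))) : List (List (String × String)) :=
  let risks : List (List (String × String)) := []
  let risks := (PySem.Dict.getD (PySem.Dict.mk compliance_report) "violations" []).foldl
    (fun acc v => acc ++ [pvRowV v]) risks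
  let risks := (PySem.Dict.getD (PySem.Dict.mk compliance_report) "warnings" []).foldl
    (fun acc w => acc ++ [pvRowW w]) risks
  let risks := (PySem.Dict.getD (PySem.Dict.mk llm_result) "additional_risks" []).foldl
    (fun acc r => acc ++ [pvRowR r]) risks
  PySem.List.sorted risks pvKey

-- ===== PORT B =====
-- buckets = [[],[],[],[],[]]; buckets[severity_order.get(row["severity"],4)].append(row)
def pvB5 : Type := List (List (String × String)) × List (List (String × String)) × List (List (String × String)) × List (List (String × String)) × List (List (String × String))

def pvPush (b : pvB5) (x : List (String × String)) : pvB5 :=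
  let k := pvKey x
  if k = 0 then (b.1 ++ [x], b.2.1, b.2.2.1, b.2.2.2.1, b.2.2.2.2)
  else if k = 1 then (b.1, b.2.1 ++ [x], b.2.2.1, b.2.2.2.1, b.2.2.2.2)
  else if k = 2 then (b.1, b.2.1, b.2.2.1 ++ [x], b.2.2.2.1, b.2.2.2.2)
  else if k = 3 then (b.1, b.2.1, b.2.2.1, b.2.2.2.1 ++ [x], b.2.2.2.2)
  else (b.1, b.2.1, b.2.2.1, b.2.2.2.1, b.2.2.2.2 ++ [x])

def build_risk_list_py_alt (compliance_report : List (String × List (List (String × String)))) (llm_result : List (String × List (List (String × String)))) : List (List (String × String)) :=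
  let b : pvB5 := ([], [], [], [], [])
  let b := (PySem.Dict.getD (PySem.Dict.mk compliance_report) "violations" []).foldl
    (fun b v => pvPush b (pvRowV v)) b
  let b := (PySem.Dict.getD (PySem.Dict.mk compliance_report) "warnings" []).foldl
    (fun b w => pvPush b (pvRowW w)) b
  let b := (PySem.Dict.getD (PySem.Dict.mk llm_result) "additional_risks" []).foldl
    (fun b r => pvPush b (pvRowR r)) b
  b.1 ++ b.2.1 ++ b.2.2.1 ++ b.2.2.2.1 ++ b.2.2.2.2

-- ===== PRECONDITION & SPEC =====
def Spec_build_risk_list_py (compliance_report : List (String × List (List (String × String)))) (llm_result : List (String × List (List (String × String)))) (out : List (List (String × String))) : Prop := out = build_risk_list_py_alt compliance_report llm_result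
instance (compliance_report : List (String × List (List (String × String)))) (llm_result : List (String × List (List (String × String)))) (out : List (List (String × String))) : Decidable (Spec_build_risk_list_py compliance_report llm_result out) := by unfold Spec_build_risk_list_py; infer_instance

-- ===== CLAIM (what is proved, stated in full; the proofs are below) =====
def Claim_equal_build_risk_list_py : Prop := ∀ (compliance_report : List (String × List (List (String × String)))) (llm_result : List (String × List (List (String × String)))), Dom_build_risk_list_py compliance_report llm_result → Spec_build_risk_list_py compliance_report llm_result (build_risk_list_py compliance_report llm_result)

-- ===== LEMMAS AND PROOFS =====

lemma pvKey_range (x : List (String × String)) : 0 ≤ pvKey x ∧ pvKey x ≤ 4 := by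
  unfold pvKey
  simp only [PySem.Dict.getD, PySem.Dict.get?, List.find?]
  constructor <;> (repeat' split) <;> simp

lemma pv_insertBy_skip {α : Type} (before : α → α → Bool) (x : α) (ys zs : List α)
    (h : ∀ y ∈ ys, before x y = false) :
    PySem.List.insertBy before x (ys ++ zs) = ys ++ PySem.List.insertBy before x zs := by
  induction ys with
  | nil => rfl
  | cons y ys ih =>
    simp only [List.cons_append, PySem.List.insertBy, h y (by simp)]
    simp [ih (fun y hy => h y (by simp [hy]))]

lemma pv_insertBy_front {α : Type} (before : α → α → Bool) (x : α) (zs : List α)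
    (h : ∀ z ∈ zs, before x z = true) :
    PySem.List.insertBy before x zs = x :: zs := by
  cases zs with
  | nil => rfl
  | cons z zs => simp [PySem.List.insertBy, h z (by simp)]

lemma pv_foldl_insertBy_buckets {α : Type} (key : α → Int) (xs : List α)
    (b0 b1 b2 b3 b4 : List α)
    (h0 : ∀ y ∈ b0, key y = 0) (h1 : ∀ y ∈ b1, key y = 1) (h2 : ∀ y ∈ b2, key y = 2)
    (h3 : ∀ y ∈ b3, key y = 3) (h4 : ∀ y ∈ b4, key y = 4)
    (hx : ∀ x ∈ xs, 0 ≤ key x ∧ key x ≤ 4) :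
    xs.foldl (fun acc x => PySem.List.insertBy (fun a b => decide (key a < key b)) x acc)
        (b0 ++ (b1 ++ (b2 ++ (b3 ++ b4))))
      = (b0 ++ xs.filter (fun x => decide (key x = 0)))
        ++ ((b1 ++ xs.filter (fun x => decide (key x = 1)))
        ++ ((b2 ++ xs.filter (fun x => decide (key x = 2)))
        ++ ((b3 ++ xs.filter (fun x => decide (key x = 3)))
        ++ (b4 ++ xs.filter (fun x => decide (key x = 4)))))) := by
  induction xs generalizing b0 b1 b2 b3 b4 with
  | nil => simp
  | cons x xs ih =>
    obtain ⟨hlo, hhi⟩ := hx x (by simp)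
    have hxs : ∀ y ∈ xs, 0 ≤ key y ∧ key y ≤ 4 := fun y hy => hx y (by simp [hy])
    have hk : key x = 0 ∨ key x = 1 ∨ key x = 2 ∨ key x = 3 ∨ key x = 4 := by omega
    simp only [List.foldl_cons]
    rcases hk with hk | hk | hk | hk | hk
    · rw [pv_insertBy_skip _ _ b0 _ (fun y hy => by simp [h0 y hy, hk]),
          pv_insertBy_front _ _ _ (fun z hz => by
            rcases List.mem_append.1 hz with h | h
            · simp [h1 z h, hk]
            rcases List.mem_append.1 h with h | h
            · simp [h2 z h, hk]
            rcases List.mem_append.1 h with h | h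
            · simp [h3 z h, hk]
            · simp [h4 z h, hk])]
      rw [show b0 ++ x :: (b1 ++ (b2 ++ (b3 ++ b4))) = (b0 ++ [x]) ++ (b1 ++ (b2 ++ (b3 ++ b4))) from by simp]
      rw [ih (b0 ++ [x]) b1 b2 b3 b4
        (fun y hy => by rcases List.mem_append.1 hy with h | h
                        · exact h0 y h
                        · simp at h; simp [h, hk]) h1 h2 h3 h4 hxs]
      simp [hk]
    · rw [pv_insertBy_skip _ _ b0 _ (fun y hy => by simp [h0 y hy, hk]),
          pv_insertBy_skip _ _ b1 _ (fun y hy => by simp [h1 y hy, hk]),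
          pv_insertBy_front _ _ _ (fun z hz => by
            rcases List.mem_append.1 hz with h | h
            · simp [h2 z h, hk]
            rcases List.mem_append.1 h with h | h
            · simp [h3 z h, hk]
            · simp [h4 z h, hk])]
      rw [show b1 ++ x :: (b2 ++ (b3 ++ b4)) = (b1 ++ [x]) ++ (b2 ++ (b3 ++ b4)) from by simp]
      rw [ih b0 (b1 ++ [x]) b2 b3 b4 h0
        (fun y hy => by rcases List.mem_append.1 hy with h | h
                        · exact h1 y h
                        · simp at h; simp [h, hk]) h2 h3 h4 hxs]
      simp [hk]
    · rw [pv_insertBy_skip _ _ b0 _ (fun y hy => by simp [h0 y hy, hk]),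
          pv_insertBy_skip _ _ b1 _ (fun y hy => by simp [h1 y hy, hk]),
          pv_insertBy_skip _ _ b2 _ (fun y hy => by simp [h2 y hy, hk]),
          pv_insertBy_front _ _ _ (fun z hz => by
            rcases List.mem_append.1 hz with h | h
            · simp [h3 z h, hk]
            · simp [h4 z h, hk])]
      rw [show b2 ++ x :: (b3 ++ b4) = (b2 ++ [x]) ++ (b3 ++ b4) from by simp]
      rw [ih b0 b1 (b2 ++ [x]) b3 b4 h0 h1
        (fun y hy => by rcases List.mem_append.1 hy with h | h
                        · exact h2 y h
                        · simp at h; simp [h, hk]) h3 h4 hxs]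
      simp [hk]
    · rw [pv_insertBy_skip _ _ b0 _ (fun y hy => by simp [h0 y hy, hk]),
          pv_insertBy_skip _ _ b1 _ (fun y hy => by simp [h1 y hy, hk]),
          pv_insertBy_skip _ _ b2 _ (fun y hy => by simp [h2 y hy, hk]),
          pv_insertBy_skip _ _ b3 _ (fun y hy => by simp [h3 y hy, hk]),
          pv_insertBy_front _ _ _ (fun z hz => by simp [h4 z hz, hk])]
      rw [show b3 ++ x :: b4 = (b3 ++ [x]) ++ b4 from by simp]
      rw [ih b0 b1 b2 (b3 ++ [x]) b4 h0 h1 h2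
        (fun y hy => by rcases List.mem_append.1 hy with h | h
                        · exact h3 y h
                        · simp at h; simp [h, hk]) h4 hxs]
      simp [hk]
    · rw [pv_insertBy_skip _ _ b0 _ (fun y hy => by simp [h0 y hy, hk]),
          pv_insertBy_skip _ _ b1 _ (fun y hy => by simp [h1 y hy, hk]),
          pv_insertBy_skip _ _ b2 _ (fun y hy => by simp [h2 y hy, hk]),
          pv_insertBy_skip _ _ b3 _ (fun y hy => by simp [h3 y hy, hk]),
          PySem.List.insertBy_of_forall_not_before _ _ _ (fun y hy => by simp [h4 y hy, hk])]
      rw [ih b0 b1 b2 b3 (b4 ++ [x]) h0 h1 h2 h3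
        (fun y hy => by rcases List.mem_append.1 hy with h | h
                        · exact h4 y h
                        · simp at h; simp [h, hk]) hxs]
      simp [hk]

lemma pv_sorted_buckets {α : Type} (key : α → Int) (xs : List α)
    (hx : ∀ x ∈ xs, 0 ≤ key x ∧ key x ≤ 4) :
    PySem.List.sorted xs key
      = xs.filter (fun x => decide (key x = 0))
        ++ (xs.filter (fun x => decide (key x = 1))
        ++ (xs.filter (fun x => decide (key x = 2))
        ++ (xs.filter (fun x => decide (key x = 3))
        ++ xs.filter (fun x => decide (key x = 4))))) := by
  rw [PySem.List.sorted_eq_foldl_insertBy]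
  simpa using pv_foldl_insertBy_buckets key xs [] [] [] [] []
    (by simp) (by simp) (by simp) (by simp) (by simp) hx

-- B's push loop fills each bucket with exactly its key class, preserving encounter order.
lemma pv_foldl_push_buckets (xs : List (List (String × String)))
    (b0 b1 b2 b3 b4 : List (List (String × String))) :
    xs.foldl (fun b x => pvPush b x) ((b0, b1, b2, b3, b4) : pvB5)
      = (b0 ++ xs.filter (fun x => decide (pvKey x = 0)),
         b1 ++ xs.filter (fun x => decide (pvKey x = 1)),
         b2 ++ xs.filter (fun x => decide (pvKey x = 2)),
         b3 ++ xs.filter (fun x => decide (pvKey x = 3)),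
         b4 ++ xs.filter (fun x => decide (pvKey x = 4))) := by
  induction xs generalizing b0 b1 b2 b3 b4 with
  | nil => simp
  | cons x xs ih =>
    obtain ⟨hlo, hhi⟩ := pvKey_range x
    have hk : pvKey x = 0 ∨ pvKey x = 1 ∨ pvKey x = 2 ∨ pvKey x = 3 ∨ pvKey x = 4 := by omega
    simp only [List.foldl_cons]
    rcases hk with hk | hk | hk | hk | hk
    · rw [show pvPush (b0, b1, b2, b3, b4) x = (b0 ++ [x], b1, b2, b3, b4) from by
        simp [pvPush, hk], ih]
      simp [hk]
    · rw [show pvPush (b0, b1, b2, b3, b4) x = (b0, b1 ++ [x], b2, b3, b4) from by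
        simp [pvPush, hk], ih]
      simp [hk]
    · rw [show pvPush (b0, b1, b2, b3, b4) x = (b0, b1, b2 ++ [x], b3, b4) from by
        simp [pvPush, hk], ih]
      simp [hk]
    · rw [show pvPush (b0, b1, b2, b3, b4) x = (b0, b1, b2, b3 ++ [x], b4) from by
        simp [pvPush, hk], ih]
      simp [hk]
    · rw [show pvPush (b0, b1, b2, b3, b4) x = (b0, b1, b2, b3, b4 ++ [x]) from by
        simp [pvPush, hk], ih]
      simp [hk]

-- The three B loops are the bucket fold over the mapped row lists.
lemma pv_foldl_push_map (f : List (String × String) → List (String × String))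
    (xs : List (List (String × String)))
    (b0 b1 b2 b3 b4 : List (List (String × String))) :
    xs.foldl (fun b v => pvPush b (f v)) ((b0, b1, b2, b3, b4) : pvB5)
      = (b0 ++ (xs.map f).filter (fun x => decide (pvKey x = 0)),
         b1 ++ (xs.map f).filter (fun x => decide (pvKey x = 1)),
         b2 ++ (xs.map f).filter (fun x => decide (pvKey x = 2)),
         b3 ++ (xs.map f).filter (fun x => decide (pvKey x = 3)),
         b4 ++ (xs.map f).filter (fun x => decide (pvKey x = 4))) := by
  simpa [List.foldl_map] using pv_foldl_push_buckets (xs.map f) b0 b1 b2 b3 b4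

-- ===== VERDICT (by name: the statement is the Claim_ definition above) =====
theorem build_risk_list_py_spec : Claim_equal_build_risk_list_py := by
  intro cr lr _
  unfold Spec_build_risk_list_py build_risk_list_py build_risk_list_py_alt
  generalize (PySem.Dict.getD (PySem.Dict.mk cr) "violations" []) = V
  generalize (PySem.Dict.getD (PySem.Dict.mk cr) "warnings" []) = W
  generalize (PySem.Dict.getD (PySem.Dict.mk lr) "additional_risks" []) = R
  simp only [PySem.List.foldl_append_eq_flatMap, List.nil_append]
  rw [pv_sorted_buckets pvKey _ (fun x _ => pvKey_range x)]
  rw [pv_foldl_push_map, pv_foldl_push_map, pv_foldl_push_map,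
      ← List.map_eq_flatMap, ← List.map_eq_flatMap, ← List.map_eq_flatMap]
  simp [List.filter_append, List.append_assoc]
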